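-- pv_equiv track=rewrite | github.com/jbkoh/scrabble | resulter.py | measure_accuracy_by_token
-- ===== SOURCE A (Python) =====
-- def measure_accuracy_by_token(pred_token_labels, orig_token_labels):
--     assert(len(pred_token_labels)==len(orig_token_labels))
--     correct_cnt = 0
--     incorrect_cnt = 0
--     for pred, orig in zip(pred_token_labels, orig_token_labels):
--         if pred==orig:
--             correct_cnt += 1
--         else:
--             incorrect_cnt += 1
--     return correct_cnt, incorrect_cnt
-- ===== SOURCE B (Python) =====
-- def measure_accuracy_by_token(pred_token_labels, orig_token_labels):
--     assert(len(pred_token_labels)==len(orig_token_labels))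
--     def go(lo, hi):
--         if lo >= hi:
--             return (0, 0)
--         if hi - lo == 1:
--             return (1, 0) if pred_token_labels[lo] == orig_token_labels[lo] else (0, 1)
--         mid = (lo + hi) // 2
--         c1, i1 = go(lo, mid)
--         c2, i2 = go(mid, hi)
--         return (c1 + c2, i1 + i2)
--     return go(0, len(pred_token_labels))
-- ===== Notes on version B (the rewrite author's own statement) =====
-- stated objective: alternative
-- what changed: B counts matches/mismatches by divide-and-conquer recursion over index halves, combining the counts of the two subranges, instead of A's single linear loop with two running counters.
import Mathlib
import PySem

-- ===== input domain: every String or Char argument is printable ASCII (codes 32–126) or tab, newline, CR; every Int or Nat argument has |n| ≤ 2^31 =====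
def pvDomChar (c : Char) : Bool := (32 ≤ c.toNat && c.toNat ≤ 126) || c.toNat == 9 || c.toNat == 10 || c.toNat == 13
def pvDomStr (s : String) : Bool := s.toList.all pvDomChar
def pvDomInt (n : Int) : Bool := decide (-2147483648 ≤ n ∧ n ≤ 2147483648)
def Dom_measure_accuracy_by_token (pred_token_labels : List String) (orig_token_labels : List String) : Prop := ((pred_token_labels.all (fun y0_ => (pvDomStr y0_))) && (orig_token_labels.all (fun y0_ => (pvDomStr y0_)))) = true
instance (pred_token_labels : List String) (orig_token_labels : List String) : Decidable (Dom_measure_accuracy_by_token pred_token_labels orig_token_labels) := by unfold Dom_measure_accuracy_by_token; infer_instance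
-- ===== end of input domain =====

-- ===== PORT A =====
-- B replaces A's linear two-counter loop by divide-and-conquer over index halves (objective: alternative).
def measure_accuracy_by_token (pred_token_labels : List String) (orig_token_labels : List String) : Int × Int :=
  (pred_token_labels.zip orig_token_labels).foldl
    (fun (acc : Int × Int) pr => if pr.1 == pr.2 then (acc.1 + 1, acc.2) else (acc.1, acc.2 + 1))
    (0, 0)

-- ===== PORT B =====
-- go lo hi: every index access pred[lo]/orig[lo] in Source B has lo < length at the call sites
-- admitted by Pre_, so getD is exact there (never reached out of range).
def goAlt (pred_token_labels : List String) (orig_token_labels : List String) (lo hi : Nat) : Int × Int :=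
  if lo ≥ hi then (0, 0)
  else if hi - lo = 1 then
    if pred_token_labels.getD lo "" == orig_token_labels.getD lo "" then (1, 0) else (0, 1)
  else
    let mid := (lo + hi) / 2
    let r1 := goAlt pred_token_labels orig_token_labels lo mid
    let r2 := goAlt pred_token_labels orig_token_labels mid hi
    (r1.1 + r2.1, r1.2 + r2.2)
termination_by hi - lo
decreasing_by all_goals omega

def measure_accuracy_by_token_alt (pred_token_labels : List String) (orig_token_labels : List String) : Int × Int :=
  goAlt pred_token_labels orig_token_labels 0 pred_token_labels.length

-- ===== PRECONDITION & SPEC =====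
-- A (and B) assert equal lengths and raise AssertionError otherwise; Pre_ admits exactly the inputs where A returns.
def Pre_measure_accuracy_by_token (pred_token_labels : List String) (orig_token_labels : List String) : Prop :=
  pred_token_labels.length = orig_token_labels.length
instance (pred_token_labels : List String) (orig_token_labels : List String) : Decidable (Pre_measure_accuracy_by_token pred_token_labels orig_token_labels) := by unfold Pre_measure_accuracy_by_token; infer_instance
def pvWitness_measure_accuracy_by_token : List String × List String := (["a", "b"], ["a", "c"])
def Spec_measure_accuracy_by_token (pred_token_labels : List String) (orig_token_labels : List String) (out : Int × Int) : Prop := out = measure_accuracy_by_token_alt pred_token_labels orig_token_labels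
instance (pred_token_labels : List String) (orig_token_labels : List String) (out : Int × Int) : Decidable (Spec_measure_accuracy_by_token pred_token_labels orig_token_labels out) := by unfold Spec_measure_accuracy_by_token; infer_instance

-- ===== CLAIM =====
def Claim_equal_measure_accuracy_by_token : Prop := ∀ (pred_token_labels : List String) (orig_token_labels : List String), Dom_measure_accuracy_by_token pred_token_labels orig_token_labels → Pre_measure_accuracy_by_token pred_token_labels orig_token_labels → Spec_measure_accuracy_by_token pred_token_labels orig_token_labels (measure_accuracy_by_token pred_token_labels orig_token_labels)

-- ===== LEMMAS AND PROOFS =====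
theorem foldl_counters (l : List (String × String)) (c i : Int) :
    l.foldl (fun (acc : Int × Int) pr => if pr.1 == pr.2 then (acc.1 + 1, acc.2) else (acc.1, acc.2 + 1)) (c, i)
      = (c + (l.countP (fun pr => pr.1 == pr.2) : Nat), i + (l.countP (fun pr => !(pr.1 == pr.2)) : Nat)) := by
  induction l generalizing c i with
  | nil => simp
  | cons hd tl ih =>
    simp only [List.foldl_cons]
    by_cases h : hd.1 == hd.2
    · rw [if_pos h, ih]; simp [h, Prod.ext_iff]; omega
    · rw [if_neg h, ih]; simp [h, Prod.ext_iff]; omega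

-- goAlt over [lo, hi) computes the two counts over the corresponding segment of the zip.
theorem goAlt_eq (p o : List String) (lo hi : Nat) (hhi : hi ≤ (p.zip o).length) :
    goAlt p o lo hi
      = ((((((p.zip o).drop lo).take (hi - lo)).countP (fun pr => pr.1 == pr.2) : Nat) : Int),
         (((((p.zip o).drop lo).take (hi - lo)).countP (fun pr => !(pr.1 == pr.2)) : Nat) : Int)) := by
  by_cases h0 : lo ≥ hi
  · rw [goAlt.eq_def]
    simp [h0, Nat.sub_eq_zero_of_le h0]
  · by_cases h1 : hi - lo = 1
    · have hlo : lo < (p.zip o).length := by omega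
      have hlt1 : lo < p.length := by
        have := List.length_zip (l₁ := p) (l₂ := o); omega
      have hlt2 : lo < o.length := by
        have := List.length_zip (l₁ := p) (l₂ := o); omega
      have hseg : ((p.zip o).drop lo).take (hi - lo) = [(p.zip o)[lo]] := by
        rw [h1, List.drop_eq_getElem_cons hlo]
        simp
      have hget : (p.zip o)[lo] = (p[lo], o[lo]) := List.getElem_zip
      rw [h1] at hseg
      rw [goAlt.eq_def]
      simp only [h0, if_false, h1, if_true]
      by_cases heq : p[lo] = o[lo] <;>
        simp [hseg, hget, List.getD, hlt1, hlt2, heq]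
    · have hm1 : lo < (lo + hi) / 2 := by omega
      have hm2 : (lo + hi) / 2 < hi := by omega
      rw [goAlt.eq_def]
      simp only [h0, if_false, h1, if_false]
      rw [goAlt_eq p o lo ((lo + hi) / 2) (by omega), goAlt_eq p o ((lo + hi) / 2) hi hhi]
      have hsplit : ((p.zip o).drop lo).take (hi - lo)
          = ((p.zip o).drop lo).take ((lo + hi) / 2 - lo)
            ++ ((p.zip o).drop ((lo + hi) / 2)).take (hi - (lo + hi) / 2) := by
        have hdd : ((p.zip o).drop lo).drop ((lo + hi) / 2 - lo) = (p.zip o).drop ((lo + hi) / 2) := by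
          rw [List.drop_drop]
          congr 1
          omega
        have hd : hi - lo = ((lo + hi) / 2 - lo) + (hi - (lo + hi) / 2) := by omega
        rw [hd, List.take_add, hdd]
      rw [hsplit]
      simp [List.countP_append]
termination_by hi - lo
decreasing_by all_goals omega

-- ===== VERDICT =====
theorem measure_accuracy_by_token_spec : Claim_equal_measure_accuracy_by_token := by
  intro p o _ hpre
  unfold Spec_measure_accuracy_by_token measure_accuracy_by_token measure_accuracy_by_token_alt
  rw [foldl_counters]
  have hz : (p.zip o).length = p.length := by
    rw [List.length_zip, hpre, Nat.min_self]
  rw [goAlt_eq p o 0 p.length (by omega)]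
  simp only [Nat.sub_zero, List.drop_zero]
  rw [← hz, List.take_length]
  simp
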